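-- pv_equiv track=rewrite | github.com/cyph3rasi/kyber | kyber/agent/orchestrator.py | _format_status_fallback
-- ===== SOURCE A (Python) =====
-- def _format_status_fallback(status_payload: str | None) -> str:
--     """Build a concise natural-language fallback status message."""
--     if not status_payload:
--         return "No status details are available yet."
--
--     payload = status_payload.strip()
--     if not payload:
--         return "No status details are available yet."
--
--     # Parse telemetry task blocks if present.
--     task_blocks: list[str] = []
--     current: list[str] = []
--     for raw_line in payload.splitlines():
--         line = raw_line.rstrip()
--         if line.startswith("Task:"):
--             if current:
--                 task_blocks.append("\n".join(current))
--             current = [line]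
--             continue
--         if current:
--             current.append(line)
--     if current:
--         task_blocks.append("\n".join(current))
--
--     def _clean(value: str | None, limit: int = 800) -> str:
--         text = " ".join((value or "").split()).strip()
--         if not text:
--             return ""
--         if len(text) <= limit:
--             return text
--         clipped = text[:limit]
--         if " " in clipped:
--             clipped = clipped.rsplit(" ", 1)[0]
--         return clipped + "..."
--
--     def _parse_block(block: str) -> dict[str, str]:
--         parsed: dict[str, str] = {}
--         for raw_line in block.splitlines():
--             if ":" not in raw_line:
--                 continue
--             key, value = raw_line.split(":", 1)
--             key = key.strip().lower()
--             value = value.strip()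
--             if key and value:
--                 parsed[key] = value
--         return parsed
--
--     def _describe(parsed: dict[str, str]) -> str:
--         task_name = _clean(parsed.get("task"), limit=140) or "This task"
--         state = (parsed.get("status") or "running").lower()
--         action = _clean(parsed.get("current action"), limit=240)
--         elapsed = _clean(parsed.get("elapsed"), limit=80)
--         outcome = _clean(parsed.get("outcome"), limit=1100)
--         failure = _clean(parsed.get("failure signal"), limit=500)
--
--         if "completed" in state:
--             sentence = f"{task_name} is complete."
--             if outcome:
--                 sentence = f"{sentence} {outcome}"
--             return sentence.strip()
--         if "failed" in state:
--             sentence = f"{task_name} failed."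
--             if failure:
--                 sentence = f"{sentence} {failure}"
--             return sentence.strip()
--         if "cancelled" in state:
--             return f"{task_name} was cancelled."
--         if "queued" in state:
--             return f"{task_name} is queued and waiting to start."
--
--         sentence = f"{task_name} is still running."
--         if action and "thinking through the approach" not in action.lower():
--             sentence = f"{sentence} Last action: {action}."
--         if elapsed:
--             sentence = f"{sentence} Runtime so far: {elapsed}."
--         return sentence.strip()
--
--     if task_blocks:
--         rendered = [_describe(_parse_block(block)) for block in task_blocks]
--         rendered = [item for item in rendered if item]
--         if rendered:
--             return " ".join(rendered)
--
--     # Non-telemetry payload fallback: keep it concise and readable.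
--     plain = _clean(payload, limit=1200)
--     return plain if plain else "No status details are available yet."
-- ===== SOURCE B (Python) =====
-- _TERMINAL = (
--     ("completed", " is complete.", "outcome", 1100),
--     ("failed", " failed.", "failure signal", 500),
--     ("cancelled", " was cancelled.", "", 0),
--     ("queued", " is queued and waiting to start.", "", 0),
-- )
--
--
-- def _format_status_fallback(status_payload):
--     """Build a concise natural-language fallback status message.
--
--     Single pass over the lines (each line parsed straight into the current
--     task dict via find/slice, no block join / re-split round-trip) and a
--     table-driven terminal-state dispatch instead of an if/elif chain.
--     """
--     if not status_payload:
--         return "No status details are available yet."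
--     payload = status_payload.strip()
--     if not payload:
--         return "No status details are available yet."
--
--     def _clean(value, limit=800):
--         text = " ".join((value or "").split()).strip()
--         if not text:
--             return ""
--         if len(text) <= limit:
--             return text
--         clipped = text[:limit]
--         if " " in clipped:
--             clipped = clipped.rsplit(" ", 1)[0]
--         return clipped + "..."
--
--     def _store(parsed, line):
--         idx = line.find(":")
--         if idx != -1:
--             key = line[:idx].strip().lower()
--             value = line[idx + 1:].strip()
--             if key and value:
--                 parsed[key] = value
--         return parsed
--
--     tasks = []
--     for raw_line in payload.splitlines():
--         line = raw_line.rstrip()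
--         if line.startswith("Task:"):
--             tasks.append(_store({}, line))
--         elif tasks:
--             _store(tasks[-1], line)
--
--     def _describe(parsed):
--         task_name = _clean(parsed.get("task"), limit=140) or "This task"
--         state = (parsed.get("status") or "running").lower()
--         hit = next((row for row in _TERMINAL if row[0] in state), None)
--         if hit is not None:
--             marker, tail, extra_key, extra_limit = hit
--             if not extra_key:
--                 return task_name + tail
--             parts = [task_name + tail]
--             extra = _clean(parsed.get(extra_key), limit=extra_limit)
--             if extra:
--                 parts.append(extra)
--             return " ".join(parts).strip()
--         parts = [task_name + " is still running."]
--         action = _clean(parsed.get("current action"), limit=240)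
--         if action and "thinking through the approach" not in action.lower():
--             parts.append("Last action: " + action + ".")
--         elapsed = _clean(parsed.get("elapsed"), limit=80)
--         if elapsed:
--             parts.append("Runtime so far: " + elapsed + ".")
--         return " ".join(parts).strip()
--
--     rendered = [msg for msg in map(_describe, tasks) if msg]
--     if rendered:
--         return " ".join(rendered)
--     plain = _clean(payload, limit=1200)
--     return plain if plain else "No status details are available yet."
-- ===== Notes on version B (the rewrite author's own statement) =====
-- stated objective: alternative
-- what changed: A groups lines into joined string blocks, re-splits and re-parses each block with a one-shot maxsplit, and renders via an if/elif chain; B does one pass over the lines parsing each line straight into the current task dict via find and two slices, and renders terminal states through a module-level dispatch table whose sentence is joined from parts.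
import Mathlib
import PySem

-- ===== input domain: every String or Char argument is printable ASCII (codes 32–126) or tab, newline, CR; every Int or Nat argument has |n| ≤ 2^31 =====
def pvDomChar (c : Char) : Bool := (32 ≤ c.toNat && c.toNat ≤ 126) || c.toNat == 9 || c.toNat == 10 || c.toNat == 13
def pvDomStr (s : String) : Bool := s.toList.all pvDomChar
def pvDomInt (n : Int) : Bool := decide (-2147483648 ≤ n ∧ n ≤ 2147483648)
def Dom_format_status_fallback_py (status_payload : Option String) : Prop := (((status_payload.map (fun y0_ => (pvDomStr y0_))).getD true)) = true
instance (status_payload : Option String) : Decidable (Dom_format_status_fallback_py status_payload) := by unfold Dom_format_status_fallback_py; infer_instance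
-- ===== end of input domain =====

-- B replaces A's two-stage parse (group lines into joined string blocks, then re-split and
-- re-parse each block) by a single pass that parses each line straight into the current task
-- dict via find/slice, and a table-driven terminal-state dispatch; same return value.

-- ===== PORT A =====
-- _clean, the plain-fallback tail and the default message are textually identical in
-- Source A and Source B, so both ports cite the same transliterations pvClean / pvPlain / pvNoStatus.

def pvNoStatus : String := "No status details are available yet."

-- _clean(value, limit); 'clipped.rsplit(" ", 1)[0]' is ported by hand as
-- clipped[:clipped.rfind(" ")], exact when " " in clipped (one cut at the last occurrence).
def pvClean (value : String) (limit : Int) : String :=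
  let text := PySem.Str.strip (PySem.Str.join " " (PySem.Str.split₀ value))
  if text = "" then ""
  else if PySem.Str.len text ≤ limit then text
  else
    let clipped := PySem.Str.slice text none (some limit)
    let clipped :=
      if PySem.Str.isIn " " clipped then
        PySem.Str.slice clipped none (some (PySem.Str.rfind clipped " "))
      else clipped
    clipped ++ "..."

-- the body of _parse_block's per-line loop in Source A
def pvParseLine (parsed : PySem.Dict String String) (raw_line : String) : PySem.Dict String String :=
  if PySem.Str.isIn ":" raw_line then
    let parts := (PySem.Str.splitMax? raw_line ":" 1).getD []
    let key := PySem.Str.lower (PySem.Str.strip (parts.getD 0 ""))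
    let value := PySem.Str.strip (parts.getD 1 "")
    if key ≠ "" ∧ value ≠ "" then parsed.insert key value else parsed
  else parsed

-- _parse_block (Source A only)
def pvParseBlock (block : String) : PySem.Dict String String :=
  (PySem.Str.splitlines block).foldl pvParseLine PySem.Dict.empty

-- Source A's _describe: the if/elif chain
def pvDescribe (parsed : PySem.Dict String String) : String :=
  let task_name := let c := pvClean (parsed.getD "task" "") 140
                   if c = "" then "This task" else c
  let state := PySem.Str.lower (let s := parsed.getD "status" ""
                                if s = "" then "running" else s)
  let action := pvClean (parsed.getD "current action" "") 240
  let elapsed := pvClean (parsed.getD "elapsed" "") 80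
  let outcome := pvClean (parsed.getD "outcome" "") 1100
  let failure := pvClean (parsed.getD "failure signal" "") 500
  if PySem.Str.isIn "completed" state then
    PySem.Str.strip (if outcome ≠ "" then task_name ++ " is complete." ++ " " ++ outcome
                     else task_name ++ " is complete.")
  else if PySem.Str.isIn "failed" state then
    PySem.Str.strip (if failure ≠ "" then task_name ++ " failed." ++ " " ++ failure
                     else task_name ++ " failed.")
  else if PySem.Str.isIn "cancelled" state then task_name ++ " was cancelled."
  else if PySem.Str.isIn "queued" state then task_name ++ " is queued and waiting to start."
  else
    let s1 := task_name ++ " is still running."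
    let s2 := if action ≠ "" ∧ ¬ PySem.Str.isIn "thinking through the approach" (PySem.Str.lower action)
              then s1 ++ " Last action: " ++ action ++ "." else s1
    let s3 := if elapsed ≠ "" then s2 ++ " Runtime so far: " ++ elapsed ++ "." else s2
    PySem.Str.strip s3

-- the shared tail: plain = _clean(payload, limit=1200); return plain if plain else default
def pvPlain (payload : String) : String :=
  let plain := pvClean payload 1200
  if plain = "" then pvNoStatus else plain

-- Source A's block-grouping loop body: state = (task_blocks, current)
def pvStepA (st : List String × List String) (raw_line : String) : List String × List String :=
  let line := PySem.Str.rstrip raw_line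
  if PySem.Str.startswith line "Task:" then
    ((if st.2.isEmpty then st.1 else st.1 ++ [PySem.Str.join "\n" st.2]), [line])
  else if st.2.isEmpty then st
  else (st.1, st.2 ++ [line])

def format_status_fallback_py (status_payload : Option String) : String :=
  match status_payload with
  | none => pvNoStatus
  | some s =>
    if s = "" then pvNoStatus
    else
      let payload := PySem.Str.strip s
      if payload = "" then pvNoStatus
      else
        let st := (PySem.Str.splitlines payload).foldl pvStepA ([], [])
        let task_blocks := if st.2.isEmpty then st.1 else st.1 ++ [PySem.Str.join "\n" st.2]
        if task_blocks.isEmpty then pvPlain payload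
        else
          let rendered := (task_blocks.map (fun b => pvDescribe (pvParseBlock b))).filter (fun i => i ≠ "")
          if rendered.isEmpty then pvPlain payload
          else PySem.Str.join " " rendered

-- ===== PORT B =====
-- the module-level _TERMINAL table of Source B: (marker, tail, extra_key, extra_limit);
-- extra_key "" stands for the rows with no extra field
def pvTerminal : List (String × String × String × Int) :=
  [("completed", " is complete.", "outcome", 1100),
   ("failed", " failed.", "failure signal", 500),
   ("cancelled", " was cancelled.", "", 0),
   ("queued", " is queued and waiting to start.", "", 0)]

-- Source B's _store: locate the first ':' with find, cut with slices
def pvStoreB (parsed : PySem.Dict String String) (line : String) : PySem.Dict String String :=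
  let idx := PySem.Str.find line ":"
  if idx ≠ -1 then
    let key := PySem.Str.lower (PySem.Str.strip (PySem.Str.slice line none (some idx)))
    let value := PySem.Str.strip (PySem.Str.slice line (some (idx + 1)) none)
    if key ≠ "" ∧ value ≠ "" then parsed.insert key value else parsed
  else parsed

-- Source B's single-pass loop body; tasks is kept most-recent-first (cons = append,
-- head = tasks[-1]) and reversed once at the end.
def pvStepB (acc : List (PySem.Dict String String)) (raw_line : String) : List (PySem.Dict String String) :=
  let line := PySem.Str.rstrip raw_line
  if PySem.Str.startswith line "Task:" then
    pvStoreB PySem.Dict.empty line :: acc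
  else
    match acc with
    | [] => []
    | d :: rest => pvStoreB d line :: rest

-- Source B's _describe: first matching _TERMINAL row, else the running sentence from joined parts
def pvDescribeB (parsed : PySem.Dict String String) : String :=
  let task_name := let c := pvClean (parsed.getD "task" "") 140
                   if c = "" then "This task" else c
  let state := PySem.Str.lower (let s := parsed.getD "status" ""
                                if s = "" then "running" else s)
  match pvTerminal.find? (fun row => PySem.Str.isIn row.1 state) with
  | some (_, tail, extra_key, extra_limit) =>
    if extra_key = "" then task_name ++ tail
    else
      let parts := [task_name ++ tail]
      let extra := pvClean (parsed.getD extra_key "") extra_limit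
      let parts := if extra ≠ "" then parts ++ [extra] else parts
      PySem.Str.strip (PySem.Str.join " " parts)
  | none =>
    let parts := [task_name ++ " is still running."]
    let action := pvClean (parsed.getD "current action" "") 240
    let parts := if action ≠ "" ∧ ¬ PySem.Str.isIn "thinking through the approach" (PySem.Str.lower action)
                 then parts ++ ["Last action: " ++ action ++ "."] else parts
    let elapsed := pvClean (parsed.getD "elapsed" "") 80
    let parts := if elapsed ≠ "" then parts ++ ["Runtime so far: " ++ elapsed ++ "."] else parts
    PySem.Str.strip (PySem.Str.join " " parts)

def format_status_fallback_py_alt (status_payload : Option String) : String :=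
  match status_payload with
  | none => pvNoStatus
  | some s =>
    if s = "" then pvNoStatus
    else
      let payload := PySem.Str.strip s
      if payload = "" then pvNoStatus
      else
        let tasks := ((PySem.Str.splitlines payload).foldl pvStepB []).reverse
        let rendered := (tasks.map pvDescribeB).filter (fun i => i ≠ "")
        if rendered.isEmpty then pvPlain payload
        else PySem.Str.join " " rendered

-- ===== PRECONDITION & SPEC =====
def Spec_format_status_fallback_py (status_payload : Option String) (out : String) : Prop := out = format_status_fallback_py_alt status_payload
instance (status_payload : Option String) (out : String) : Decidable (Spec_format_status_fallback_py status_payload out) := by unfold Spec_format_status_fallback_py; infer_instance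

-- ===== CLAIM (what is proved, stated in full; the proofs are below) =====
def Claim_equal_format_status_fallback_py : Prop := ∀ (status_payload : Option String), Dom_format_status_fallback_py status_payload → Spec_format_status_fallback_py status_payload (format_status_fallback_py status_payload)

-- ===== LEMMAS AND PROOFS =====

-- (1) Source B's find/slice _store computes exactly Source A's split(":", 1) parse of one line

theorem pv_go_zero (fuel : Nat) (b cur : List Char) (acc : List (List Char)) :
    PySem.Chars.splitOnMax.go [':'] fuel 0 b cur acc = ((cur.reverse ++ b) :: acc).reverse := by
  rw [PySem.Chars.splitOnMax.go.eq_def]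
  cases fuel with
  | zero => rfl
  | succ f => cases b with
    | nil => simp
    | cons c rest => simp

theorem pv_go_scan (a : List Char) : ∀ (t cur : List Char) (acc : List (List Char)) (fuel : Nat),
    ':' ∉ a → a.length < fuel →
    PySem.Chars.splitOnMax.go [':'] fuel 1 (a ++ t) cur acc =
      PySem.Chars.splitOnMax.go [':'] (fuel - a.length) 1 t (a.reverse ++ cur) acc := by
  induction a with
  | nil => intro t cur acc fuel _ _; simp
  | cons c a' ih =>
    intro t cur acc fuel hnin hlen
    obtain ⟨f, rfl⟩ : ∃ f, fuel = f + 1 := ⟨fuel - 1, by omega⟩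
    have hc : ¬ (':' = c) := by intro h; exact hnin (by simp [h.symm])
    rw [List.cons_append, PySem.Chars.splitOnMax.go.eq_def]
    have hpre : List.isPrefixOf [':'] (c :: (a' ++ t)) = false := by
      simp [List.isPrefixOf, hc]
    have h1 : f - a'.length = f + 1 - (c :: a').length := by simp
    have h2 : a'.reverse ++ (c :: cur) = (c :: a').reverse ++ cur := by simp
    simp only [hpre, Bool.false_eq_true, if_false]
    rw [ih t (c :: cur) acc f (fun h => hnin (by simp [h])) (by simp at hlen; omega), h1, h2,
      if_neg (by decide)]

theorem pv_go_hit (fuel : Nat) (b cur : List Char) (acc : List (List Char)) (h : 0 < fuel) :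
    PySem.Chars.splitOnMax.go [':'] fuel 1 (':' :: b) cur acc = (b :: cur.reverse :: acc).reverse := by
  obtain ⟨f, rfl⟩ : ∃ f, fuel = f + 1 := ⟨fuel - 1, by omega⟩
  rw [PySem.Chars.splitOnMax.go.eq_def]
  have hp : List.isPrefixOf [':'] (':' :: b) = true := by simp [List.isPrefixOf]
  simp only [hp, reduceIte, List.length_cons, List.length_nil, List.drop_succ_cons,
    List.drop_zero]
  rw [show ((1 : Nat) - 1) = 0 by rfl, pv_go_zero]
  simp

theorem pv_splitOnMax_colon (s : List Char) (n : Nat) (hn : n < s.length)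
    (hc : s[n]'hn = ':') (hfree : ':' ∉ s.take n) :
    PySem.Chars.splitOnMax s [':'] 1 = [s.take n, s.drop (n + 1)] := by
  have hdec : s = s.take n ++ (':' :: s.drop (n + 1)) := by
    conv_lhs => rw [← List.take_append_drop n s, List.drop_eq_getElem_cons hn, hc]
  rw [PySem.Chars.splitOnMax, if_neg (by omega)]
  simp only [Int.toNat_one]
  conv_lhs => rw [hdec]
  rw [pv_go_scan _ _ _ _ _ hfree (by simp)]
  rw [pv_go_hit _ _ _ _ (by simp)]
  simp

theorem pv_storeB_eq (d : PySem.Dict String String) (line : String) :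
    pvStoreB d line = pvParseLine d line := by
  by_cases hin : PySem.Str.isIn ":" line = true
  · have hinf : [':'] <:+: line.toList := by
      have := (PySem.Str.isIn_iff_infix ":" line).mp hin
      simpa using this
    have h0 : 0 ≤ PySem.Chars.find line.toList [':'] :=
      (PySem.Chars.find_nonneg_iff _ _).mpr hinf
    obtain ⟨hpre, hmin⟩ := PySem.Chars.find_spec h0
    set n := (PySem.Chars.find line.toList [':']).toNat with hn
    obtain ⟨t, ht⟩ := hpre
    have hlt : n < line.toList.length := by
      have h2 := congrArg List.length ht
      simp at h2 ⊢
      omega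
    have hcn : line.toList[n]'hlt = ':' := by
      have h3 : ':' :: t = line.toList[n]'hlt :: line.toList.drop (n + 1) := by
        simpa using ht.trans (List.drop_eq_getElem_cons hlt)
      exact (List.cons.injEq _ _ _ _ ▸ h3).1.symm
    have hfree : ':' ∉ line.toList.take n := by
      intro hmem
      obtain ⟨j, hj, hjc⟩ := List.getElem_of_mem hmem
      have hjn : j < n := by simp at hj; omega
      refine hmin j hjn ?_
      have hjlt : j < line.toList.length := by omega
      rw [List.getElem_take] at hjc
      rw [List.drop_eq_getElem_cons hjlt, hjc]
      exact ⟨_, rfl⟩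
    have hso : PySem.Chars.splitOnMax line.toList [':'] 1 =
        [line.toList.take n, line.toList.drop (n + 1)] :=
      pv_splitOnMax_colon line.toList n hlt hcn hfree
    have hfind : PySem.Str.find line ":" = (n : Int) := by
      simp only [PySem.Str.find]
      rw [show (":".toList) = [':'] from rfl]
      omega
    have hparts : (PySem.Str.splitMax? line ":" 1).getD [] =
        [String.ofList (line.toList.take n), String.ofList (line.toList.drop (n + 1))] := by
      simp only [PySem.Str.splitMax?, PySem.Chars.splitMax?]
      rw [show (":".toList) = [':'] from rfl, if_neg (by simp), hso]
      rfl
    have hsl1 : PySem.Str.slice line none (some ((n : Int))) = String.ofList (line.toList.take n) := by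
      simp only [PySem.Str.slice, PySem.Chars.slice_eq_listSlice]
      rw [PySem.List.slice_to _ (by omega : (0:Int) ≤ (n : Int))]
      simp
    have hsl2 : PySem.Str.slice line (some ((n : Int) + 1)) none = String.ofList (line.toList.drop (n + 1)) := by
      simp only [PySem.Str.slice, PySem.Chars.slice_eq_listSlice]
      rw [PySem.List.slice_from _ (by omega : (0:Int) ≤ (n : Int) + 1)]
      norm_num
    rw [pvStoreB, pvParseLine, if_pos hin]
    simp only [hfind, hparts, hsl1, hsl2]
    rw [if_pos (by omega)]
    simp
  · have hfind : PySem.Chars.find line.toList [':'] = -1 := by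
      rw [PySem.Chars.find_eq_neg_one_iff]
      intro hinf
      exact hin ((PySem.Str.isIn_iff_infix ":" line).mpr (by simpa using hinf))
    rw [pvStoreB, pvParseLine, if_neg hin]
    simp only [PySem.Str.find]
    rw [show (":".toList) = [':'] from rfl, hfind]
    simp


-- (2) Source B's table-driven _describe computes Source A's if/elif chain

theorem pv_join_one (a : String) : PySem.Str.join " " [a] = a := by
  simp only [PySem.Str.join, PySem.Chars.join, List.map]
  rw [show (" ".toList) = [' '] from rfl]
  simp [List.intercalate, String.ofList_toList]

theorem pv_join_two (a b : String) : PySem.Str.join " " [a, b] = a ++ " " ++ b := by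
  apply String.toList_inj.mp
  rw [PySem.Str.toList_join, show (" ".toList) = [' '] from rfl]
  simp [PySem.Chars.join, List.intercalate, String.toList_append]

theorem pv_join_three (a b c : String) :
    PySem.Str.join " " [a, b, c] = a ++ " " ++ b ++ " " ++ c := by
  apply String.toList_inj.mp
  rw [PySem.Str.toList_join, show (" ".toList) = [' '] from rfl]
  simp [PySem.Chars.join, List.intercalate, String.toList_append]

theorem pv_describeB_eq (parsed : PySem.Dict String String) :
    pvDescribeB parsed = pvDescribe parsed := by
  simp only [pvDescribeB, pvDescribe, pvTerminal]
  set tn := (if pvClean (parsed.getD "task" "") 140 = "" then "This task"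
             else pvClean (parsed.getD "task" "") 140) with htn
  set st := PySem.Str.lower (if parsed.getD "status" "" = "" then "running"
                             else parsed.getD "status" "") with hst
  set act := pvClean (parsed.getD "current action" "") 240 with hact
  set ela := pvClean (parsed.getD "elapsed" "") 80 with hela
  set outc := pvClean (parsed.getD "outcome" "") 1100 with houtc
  set fl := pvClean (parsed.getD "failure signal" "") 500 with hfl
  by_cases h1 : PySem.Str.isIn "completed" st = true
  · simp only [List.find?, h1, reduceIte, ← houtc]
    rw [if_neg (show ¬(("outcome" : String) = "") by decide)]
    by_cases ho : outc ≠ ""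
    · rw [if_pos ho, if_pos ho]
      simp only [List.singleton_append, pv_join_two]
    · rw [if_neg ho, if_neg ho, pv_join_one]
  · by_cases h2 : PySem.Str.isIn "failed" st = true
    · simp only [List.find?, h1, h2, Bool.false_eq_true, if_false, reduceIte, ← hfl]
      rw [if_neg (show ¬(("failure signal" : String) = "") by decide)]
      by_cases hf : fl ≠ ""
      · rw [if_pos hf, if_pos hf]
        simp only [List.singleton_append, pv_join_two]
      · rw [if_neg hf, if_neg hf, pv_join_one]
    · by_cases h3 : PySem.Str.isIn "cancelled" st = true
      · simp only [List.find?, h1, h2, h3, Bool.false_eq_true, if_false, reduceIte]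
      · by_cases h4 : PySem.Str.isIn "queued" st = true
        · simp only [List.find?, h1, h2, h3, h4, Bool.false_eq_true, if_false, reduceIte]
        · simp only [List.find?, h1, h2, h3, h4, Bool.false_eq_true, if_false]
          by_cases ha : act ≠ "" ∧ ¬ PySem.Str.isIn "thinking through the approach" (PySem.Str.lower act) = true
          · rw [if_pos ha, if_pos ha]
            by_cases he : ela ≠ ""
            · rw [if_pos he, if_pos he]
              simp only [List.cons_append, List.nil_append, pv_join_three]
              apply congrArg PySem.Str.strip
              apply String.toList_inj.mp
              simp only [String.toList_append,
                show (" Last action: " : String).toList = ' ' :: ("Last action: " : String).toList from rfl,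
                show (" Runtime so far: " : String).toList = ' ' :: ("Runtime so far: " : String).toList from rfl,
                show (" " : String).toList = [' '] from rfl]
              simp
            · rw [if_neg he, if_neg he]
              simp only [List.singleton_append, pv_join_two]
              apply congrArg PySem.Str.strip
              apply String.toList_inj.mp
              simp only [String.toList_append,
                show (" Last action: " : String).toList = ' ' :: ("Last action: " : String).toList from rfl,
                show (" " : String).toList = [' '] from rfl]
              simp
          · rw [if_neg ha, if_neg ha]
            by_cases he : ela ≠ ""
            · rw [if_pos he, if_pos he]
              simp only [List.singleton_append, pv_join_two]
              apply congrArg PySem.Str.strip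
              apply String.toList_inj.mp
              simp only [String.toList_append,
                show (" Runtime so far: " : String).toList = ' ' :: ("Runtime so far: " : String).toList from rfl,
                show (" " : String).toList = [' '] from rfl]
              simp
            · rw [if_neg he, if_neg he, pv_join_one]


-- (3) the single-pass line loop of Source B builds exactly the parses of Source A's blocks
-- (splitlines / join "\n" bookkeeping)

-- the line-break predicate used by PySem.Chars.splitlines, given a name
def pvIsB (c : Char) : Bool :=
  decide (c.toNat = 10) || decide (c.toNat = 13) || decide (c.toNat = 11) || decide (c.toNat = 12) ||
  decide (c.toNat = 28) || decide (c.toNat = 29) || decide (c.toNat = 30) || decide (c.toNat = 133) ||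
  decide (c.toNat = 8232) || decide (c.toNat = 8233)

theorem pv_splitlines_eq (s : List Char) :
    PySem.Chars.splitlines s = PySem.Chars.splitlines.go pvIsB s [] [] := rfl

-- "break-free": the line contains no splitlines boundary character
def pvBF (l : List Char) : Prop := ∀ c ∈ l, pvIsB c = false

theorem pv_go_nil (isB : Char → Bool) (cur : List Char) (acc : List (List Char)) :
    PySem.Chars.splitlines.go isB [] cur acc =
      if cur.isEmpty then acc.reverse else (cur.reverse :: acc).reverse := by
  rw [PySem.Chars.splitlines.go.eq_def]

theorem pv_go_cons_ne (isB : Char → Bool) (c : Char) (rest cur : List Char) (acc : List (List Char))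
    (h : c ≠ '\r') :
    PySem.Chars.splitlines.go isB (c :: rest) cur acc =
      if isB c then PySem.Chars.splitlines.go isB rest [] (cur.reverse :: acc)
      else PySem.Chars.splitlines.go isB rest (c :: cur) acc := by
  rw [PySem.Chars.splitlines.go.eq_def]
  split
  · simp_all
  · simp_all
  · rename_i heq; cases heq; rfl

theorem pv_go_line (l rest cur : List Char) (acc : List (List Char)) (h : pvBF l) :
    PySem.Chars.splitlines.go pvIsB (l ++ rest) cur acc =
      PySem.Chars.splitlines.go pvIsB rest (l.reverse ++ cur) acc := by
  induction l generalizing cur with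
  | nil => simp
  | cons c t ih =>
    have hc : pvIsB c = false := h c (by simp)
    have hcr : c ≠ '\r' := by rintro rfl; simp [pvIsB] at hc
    rw [List.cons_append, pv_go_cons_ne _ _ _ _ _ hcr, if_neg (by simp [hc])]
    rw [ih _ (fun x hx => h x (List.mem_cons_of_mem _ hx))]
    simp

-- splitlines ∘ join "\n" on break-free pieces: identity up to one dropped trailing empty piece
theorem pv_go_join (ls : List (List Char)) (acc : List (List Char))
    (hne : ls ≠ []) (h : ∀ l ∈ ls, pvBF l) :
    PySem.Chars.splitlines.go pvIsB (List.intercalate ['\n'] ls) [] acc =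
      acc.reverse ++ (if ls.getLast? = some [] then ls.dropLast else ls) := by
  induction ls generalizing acc with
  | nil => simp at hne
  | cons l ls ih =>
    cases ls with
    | nil =>
      rw [show List.intercalate ['\n'] [l] = l ++ [] by simp [List.intercalate]]
      rw [pv_go_line _ _ _ _ (h l (by simp)), pv_go_nil]
      rcases l with _ | ⟨c, t⟩ <;> simp
    | cons l2 ls2 =>
      have hi : List.intercalate ['\n'] (l :: l2 :: ls2) =
          l ++ ('\n' :: List.intercalate ['\n'] (l2 :: ls2)) := by
        simp [List.intercalate, List.intersperse]
      rw [hi, pv_go_line _ _ _ _ (h l (by simp)),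
        pv_go_cons_ne _ _ _ _ _ (by decide), if_pos (by decide)]
      rw [ih _ (by simp) (fun x hx => h x (List.mem_cons_of_mem _ hx))]
      simp only [List.reverse_cons, List.append_assoc, List.singleton_append,
        List.getLast?_cons_cons]
      split <;> simp

-- every piece produced by splitlines is break-free
theorem pv_go_pieces (n : Nat) : ∀ (s cur : List Char) (acc : List (List Char)),
    s.length ≤ n → pvBF cur → (∀ l ∈ acc, pvBF l) →
    ∀ l ∈ PySem.Chars.splitlines.go pvIsB s cur acc, pvBF l := by
  induction n with
  | zero =>
    intro s cur acc hlen hcur hacc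
    have : s = [] := by cases s <;> simp_all
    subst this
    rw [pv_go_nil]
    split
    · simpa using fun l hl => hacc l (by simpa using hl)
    · intro l hl
      simp only [List.mem_reverse, List.mem_cons] at hl
      rcases hl with rfl | hl
      · intro c hc; exact hcur c (by simpa using hc)
      · exact hacc l hl
  | succ n ih =>
    intro s cur acc hlen hcur hacc
    rw [PySem.Chars.splitlines.go.eq_def]
    split
    · split
      · simpa using fun l hl => hacc l (by simpa using hl)
      · intro l hl
        simp only [List.mem_reverse, List.mem_cons] at hl
        rcases hl with rfl | hl
        · intro c hc; exact hcur c (by simpa using hc)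
        · exact hacc l hl
    · rename_i rest
      refine ih rest [] _ (by simp at hlen; omega) (by intro x hx; simp at hx) ?_
      intro l hl
      simp only [List.mem_cons] at hl
      rcases hl with rfl | hl
      · intro x hx; exact hcur x (by simpa using hx)
      · exact hacc l hl
    · rename_i c rest hov
      split
      · refine ih rest [] _ (by simp at hlen; omega) (by intro x hx; simp at hx) ?_
        intro l hl
        simp only [List.mem_cons] at hl
        rcases hl with rfl | hl
        · intro x hx; exact hcur x (by simpa using hx)
        · exact hacc l hl
      · rename_i hb
        refine ih rest _ _ (by simp at hlen; omega) ?_ hacc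
        intro x hx
        simp only [List.mem_cons] at hx
        rcases hx with rfl | hx
        · simpa using hb
        · exact hcur x hx

theorem pv_pieces_bf (payload : String) :
    ∀ raw ∈ PySem.Str.splitlines payload, pvBF raw.toList := by
  intro raw hraw
  have h1 : raw.toList ∈ PySem.Chars.splitlines payload.toList := by
    rw [← PySem.Str.splitlines_map_toList]
    exact List.mem_map_of_mem hraw
  rw [pv_splitlines_eq] at h1
  exact pv_go_pieces payload.toList.length _ _ _ le_rfl
    (by intro x hx; simp at hx) (by intro l hl; simp at hl) _ h1

theorem pv_rstrip_bf (raw : String) (h : pvBF raw.toList) :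
    pvBF (PySem.Str.rstrip raw).toList := by
  intro c hc
  rw [PySem.Str.toList_rstrip] at hc
  refine h c ?_
  simp only [PySem.Chars.rstrip, List.mem_reverse] at hc
  exact (List.mem_reverse).mp ((List.dropWhile_sublist _).mem hc)

-- splitlines of a "\n"-join of break-free lines, at the String level
theorem pv_splitlines_join (cur : List String) (hne : cur ≠ [])
    (h : ∀ l ∈ cur, pvBF l.toList) :
    PySem.Str.splitlines (PySem.Str.join "\n" cur) =
      if cur.getLast? = some "" then cur.dropLast else cur := by
  have hmap : List.map String.toList (PySem.Str.splitlines (PySem.Str.join "\n" cur)) =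
      List.map String.toList (if cur.getLast? = some "" then cur.dropLast else cur) := by
    rw [PySem.Str.splitlines_map_toList, PySem.Str.toList_join]
    have : PySem.Chars.join "\n".toList (List.map String.toList cur) =
        List.intercalate ['\n'] (List.map String.toList cur) := rfl
    rw [this, pv_splitlines_eq,
      pv_go_join _ [] (by simpa using hne) (by intro l hl; obtain ⟨x, hx, rfl⟩ := List.mem_map.mp hl; exact h x hx)]
    have hlast : (List.map String.toList cur).getLast? = some [] ↔ cur.getLast? = some "" := by
      rw [List.getLast?_map]
      cases hcl : cur.getLast? with
      | none => simp
      | some x =>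
        simp only [Option.map_some, Option.some_inj]
        constructor
        · intro hx
          have : x = "" := String.toList_inj.mp (by simpa using hx)
          simp [this]
        · intro hx; simp [hx]
    by_cases hc : cur.getLast? = some ""
    · rw [if_pos (hlast.mpr hc), if_pos hc]
      simp [List.map_dropLast]
    · rw [if_neg (fun hx => hc (hlast.mp hx)), if_neg hc]
      simp
  exact List.map_injective_iff.mpr (fun a b => String.toList_inj.mp) hmap

theorem pv_parseLine_empty (d : PySem.Dict String String) : pvParseLine d "" = d := by
  rw [pvParseLine, if_neg (by decide)]

theorem pv_parseBlock_join (cur : List String) (hne : cur ≠ [])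
    (h : ∀ l ∈ cur, pvBF l.toList) :
    pvParseBlock (PySem.Str.join "\n" cur) = cur.foldl pvParseLine PySem.Dict.empty := by
  rw [pvParseBlock, pv_splitlines_join cur hne h]
  by_cases hc : cur.getLast? = some ""
  · rw [if_pos hc]
    conv_rhs => rw [← List.dropLast_append_getLast hne]
    rw [List.foldl_append]
    have : cur.getLast hne = "" := by
      have := List.getLast?_eq_some_getLast (l := cur) hne
      rw [hc] at this
      exact (Option.some_inj.mp this.symm)
    simp [this, pv_parseLine_empty]
  · rw [if_neg hc]

-- the coupling invariant between A's fold state and B's (reversed) dict list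
def pvH (blocks current : List String) (dsrev : List (PySem.Dict String String)) : Prop :=
  (current = [] → blocks = []) ∧
  dsrev.reverse = blocks.map pvParseBlock ++
    (if current.isEmpty then [] else [current.foldl pvParseLine PySem.Dict.empty])

theorem pv_invariant (lines : List String) :
    ∀ (blocks current : List String) (dsrev : List (PySem.Dict String String)),
    (∀ raw ∈ lines, pvBF (PySem.Str.rstrip raw).toList) →
    (∀ l ∈ current, pvBF l.toList) →
    pvH blocks current dsrev →
    pvH (lines.foldl pvStepA (blocks, current)).1 (lines.foldl pvStepA (blocks, current)).2
        (lines.foldl pvStepB dsrev) ∧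
      ∀ l ∈ (lines.foldl pvStepA (blocks, current)).2, pvBF l.toList := by
  induction lines with
  | nil => intro blocks current dsrev _ hcur hH; exact ⟨hH, hcur⟩
  | cons raw lines ih =>
    intro blocks current dsrev hlines hcur hH
    obtain ⟨hH1, hH2⟩ := hH
    have hlraw : pvBF (PySem.Str.rstrip raw).toList := hlines raw (by simp)
    have hrest : ∀ r ∈ lines, pvBF (PySem.Str.rstrip r).toList :=
      fun r hr => hlines r (by simp [hr])
    simp only [List.foldl_cons]
    by_cases ht : PySem.Str.startswith (PySem.Str.rstrip raw) "Task:" = true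
    · have hA : pvStepA (blocks, current) raw =
          ((if current.isEmpty = true then blocks else blocks ++ [PySem.Str.join "\n" current]),
            [PySem.Str.rstrip raw]) := by
        simp only [pvStepA, ht, if_true]
      have hB : pvStepB dsrev raw = pvParseLine PySem.Dict.empty (PySem.Str.rstrip raw) :: dsrev := by
        simp only [pvStepB, ht, if_true, pv_storeB_eq]
      rw [hA, hB]
      refine ih _ _ _ hrest (by intro l hl; simp only [List.mem_singleton] at hl; subst hl; exact hlraw) ?_
      refine ⟨by intro h; simp at h, ?_⟩
      simp only [List.reverse_cons, hH2, List.isEmpty_cons, Bool.false_eq_true, if_false]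
      by_cases hce : current = []
      · subst hce
        simp
      · have hce' : current.isEmpty = false := by simpa using hce
        simp only [hce', Bool.false_eq_true, if_false]
        rw [List.map_append, List.map_singleton, pv_parseBlock_join current hce hcur]
        simp [List.foldl]
    · have hf : PySem.Str.startswith (PySem.Str.rstrip raw) "Task:" = false := by
        simpa using ht
      by_cases hce : current = []
      · have hb0 : blocks = [] := hH1 hce
        have hds : dsrev = [] := by
          have := hH2
          rw [hce, hb0] at this
          simpa using congrArg List.reverse this
        have hA : pvStepA (blocks, current) raw = (blocks, current) := by
          simp only [pvStepA, hf, Bool.false_eq_true, if_false, hce]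
          simp
        have hB : pvStepB dsrev raw = dsrev := by
          rw [hds]
          simp only [pvStepB, hf, Bool.false_eq_true, if_false]
        rw [hA, hB]
        exact ih _ _ _ hrest hcur ⟨hH1, hH2⟩
      · have hce' : current.isEmpty = false := by simpa using hce
        have hA : pvStepA (blocks, current) raw = (blocks, current ++ [PySem.Str.rstrip raw]) := by
          simp only [pvStepA, hf, Bool.false_eq_true, if_false, hce']
        obtain ⟨d, rest, rfl⟩ : ∃ d rest, dsrev = d :: rest := by
          cases dsrev with
          | nil =>
            exfalso
            rw [hce'] at hH2
            simp at hH2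
          | cons d rest => exact ⟨d, rest, rfl⟩
        have hB : pvStepB (d :: rest) raw = pvParseLine d (PySem.Str.rstrip raw) :: rest := by
          simp only [pvStepB, hf, Bool.false_eq_true, if_false, pv_storeB_eq]
        rw [hA, hB]
        rw [hce'] at hH2
        simp only [Bool.false_eq_true, if_false] at hH2
        have hrev := congrArg List.reverse hH2
        simp only [List.reverse_reverse, List.reverse_append, List.reverse_singleton,
          List.singleton_append] at hrev
        rw [List.cons.injEq] at hrev
        obtain ⟨hd1, hd2⟩ := hrev
        refine ih _ _ _ hrest ?_ ?_
        · intro l hl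
          rcases List.mem_append.mp hl with hl | hl
          · exact hcur l hl
          · simp only [List.mem_singleton] at hl; subst hl; exact hlraw
        · refine ⟨by intro h; simp at h, ?_⟩
          rw [List.reverse_cons]
          have : rest.reverse = List.map pvParseBlock blocks := by
            rw [hd2]; simp
          rw [this, hd1]
          simp [List.foldl_append]

-- ===== VERDICT (by name: the statement is the Claim_ definition above) =====
theorem format_status_fallback_py_spec : Claim_equal_format_status_fallback_py := by
  intro sp _
  unfold Spec_format_status_fallback_py
  cases sp with
  | none => rfl
  | some s =>
    rw [format_status_fallback_py, format_status_fallback_py_alt]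
    by_cases h1 : s = ""
    · simp [h1]
    · rw [if_neg h1, if_neg h1]
      by_cases h2 : PySem.Str.strip s = ""
      · rw [if_pos h2, if_pos h2]
      · rw [if_neg h2, if_neg h2]
        set payload := PySem.Str.strip s with hpay
        have hlines : ∀ raw ∈ PySem.Str.splitlines payload, pvBF (PySem.Str.rstrip raw).toList :=
          fun raw hr => pv_rstrip_bf raw (pv_pieces_bf payload raw hr)
        obtain ⟨⟨hH1, hH2⟩, hcur⟩ := pv_invariant (PySem.Str.splitlines payload) [] [] []
          hlines (by intro l hl; simp at hl) ⟨fun _ => rfl, by simp⟩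
        set st := (PySem.Str.splitlines payload).foldl pvStepA ([], []) with hst
        set ds := (PySem.Str.splitlines payload).foldl pvStepB [] with hds
        have hkey : (if st.2.isEmpty then st.1 else st.1 ++ [PySem.Str.join "\n" st.2]).map pvParseBlock
            = ds.reverse := by
          by_cases hce : st.2 = []
          · rw [if_pos (by simp [hce])]
            rw [hH2, hce]
            simp
          · have hce' : st.2.isEmpty = false := by simpa using hce
            rw [if_neg (by simp [hce'])]
            rw [List.map_append, hH2, hce']
            simp only [if_neg (by simp : ¬(false = true))]
            rw [List.map_singleton, pv_parseBlock_join st.2 hce hcur]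
        set task_blocks := (if st.2.isEmpty then st.1 else st.1 ++ [PySem.Str.join "\n" st.2])
          with htb
        have hrend : (task_blocks.map (fun b => pvDescribe (pvParseBlock b))).filter (fun i => i ≠ "")
            = (ds.reverse.map pvDescribeB).filter (fun i => i ≠ "") := by
          rw [← hkey, List.map_map]
          simp only [Function.comp_def, pv_describeB_eq]
        by_cases hbe : task_blocks.isEmpty
        · rw [if_pos hbe]
          have : ds.reverse = [] := by
            rw [← hkey]
            simp [List.isEmpty_iff.mp hbe]
          rw [this]
          simp
        · rw [if_neg hbe, ← htb, hrend]
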